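-- pv_equiv track=rewrite | github.com/haruno87/RosBot_V2_source | max_ws/src/service/scripts/motor_contro_2l.py | usMBCRC16
-- ===== SOURCE A (Python) =====
-- aucCRCHi = [
--     0x00, 0xC1, 0x81, 0x40, 0x01, 0xC0, 0x80, 0x41, 0x01, 0xC0, 0x80, 0x41,
--     0x00, 0xC1, 0x81, 0x40, 0x01, 0xC0, 0x80, 0x41, 0x00, 0xC1, 0x81, 0x40,
--     0x00, 0xC1, 0x81, 0x40, 0x01, 0xC0, 0x80, 0x41, 0x01, 0xC0, 0x80, 0x41,
--     0x00, 0xC1, 0x81, 0x40, 0x00, 0xC1, 0x81, 0x40, 0x01, 0xC0, 0x80, 0x41,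
--     0x00, 0xC1, 0x81, 0x40, 0x01, 0xC0, 0x80, 0x41, 0x01, 0xC0, 0x80, 0x41,
--     0x00, 0xC1, 0x81, 0x40, 0x01, 0xC0, 0x80, 0x41, 0x00, 0xC1, 0x81, 0x40,
--     0x00, 0xC1, 0x81, 0x40, 0x01, 0xC0, 0x80, 0x41, 0x00, 0xC1, 0x81, 0x40,
--     0x01, 0xC0, 0x80, 0x41, 0x01, 0xC0, 0x80, 0x41, 0x00, 0xC1, 0x81, 0x40,
--     0x00, 0xC1, 0x81, 0x40, 0x01, 0xC0, 0x80, 0x41, 0x01, 0xC0, 0x80, 0x41,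
--     0x00, 0xC1, 0x81, 0x40, 0x01, 0xC0, 0x80, 0x41, 0x00, 0xC1, 0x81, 0x40,
--     0x00, 0xC1, 0x81, 0x40, 0x01, 0xC0, 0x80, 0x41, 0x01, 0xC0, 0x80, 0x41,
--     0x00, 0xC1, 0x81, 0x40, 0x00, 0xC1, 0x81, 0x40, 0x01, 0xC0, 0x80, 0x41,
--     0x00, 0xC1, 0x81, 0x40, 0x01, 0xC0, 0x80, 0x41, 0x01, 0xC0, 0x80, 0x41,
--     0x00, 0xC1, 0x81, 0x40, 0x00, 0xC1, 0x81, 0x40, 0x01, 0xC0, 0x80, 0x41,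
--     0x01, 0xC0, 0x80, 0x41, 0x00, 0xC1, 0x81, 0x40, 0x01, 0xC0, 0x80, 0x41,
--     0x00, 0xC1, 0x81, 0x40, 0x00, 0xC1, 0x81, 0x40, 0x01, 0xC0, 0x80, 0x41,
--     0x00, 0xC1, 0x81, 0x40, 0x01, 0xC0, 0x80, 0x41, 0x01, 0xC0, 0x80, 0x41,
--     0x00, 0xC1, 0x81, 0x40, 0x01, 0xC0, 0x80, 0x41, 0x00, 0xC1, 0x81, 0x40,
--     0x00, 0xC1, 0x81, 0x40, 0x01, 0xC0, 0x80, 0x41, 0x01, 0xC0, 0x80, 0x41,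
--     0x00, 0xC1, 0x81, 0x40, 0x00, 0xC1, 0x81, 0x40, 0x01, 0xC0, 0x80, 0x41,
--     0x00, 0xC1, 0x81, 0x40, 0x01, 0xC0, 0x80, 0x41, 0x01, 0xC0, 0x80, 0x41,
--     0x00, 0xC1, 0x81, 0x40
-- ]
--
-- aucCRCLo = [
--     0x00, 0xC0, 0xC1, 0x01, 0xC3, 0x03, 0x02, 0xC2, 0xC6, 0x06, 0x07, 0xC7,
--     0x05, 0xC5, 0xC4, 0x04, 0xCC, 0x0C, 0x0D, 0xCD, 0x0F, 0xCF, 0xCE, 0x0E,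
--     0x0A, 0xCA, 0xCB, 0x0B, 0xC9, 0x09, 0x08, 0xC8, 0xD8, 0x18, 0x19, 0xD9,
--     0x1B, 0xDB, 0xDA, 0x1A, 0x1E, 0xDE, 0xDF, 0x1F, 0xDD, 0x1D, 0x1C, 0xDC,
--     0x14, 0xD4, 0xD5, 0x15, 0xD7, 0x17, 0x16, 0xD6, 0xD2, 0x12, 0x13, 0xD3,
--     0x11, 0xD1, 0xD0, 0x10, 0xF0, 0x30, 0x31, 0xF1, 0x33, 0xF3, 0xF2, 0x32,
--     0x36, 0xF6, 0xF7, 0x37, 0xF5, 0x35, 0x34, 0xF4, 0x3C, 0xFC, 0xFD, 0x3D,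
--     0xFF, 0x3F, 0x3E, 0xFE, 0xFA, 0x3A, 0x3B, 0xFB, 0x39, 0xF9, 0xF8, 0x38,
--     0x28, 0xE8, 0xE9, 0x29, 0xEB, 0x2B, 0x2A, 0xEA, 0xEE, 0x2E, 0x2F, 0xEF,
--     0x2D, 0xED, 0xEC, 0x2C, 0xE4, 0x24, 0x25, 0xE5, 0x27, 0xE7, 0xE6, 0x26,
--     0x22, 0xE2, 0xE3, 0x23, 0xE1, 0x21, 0x20, 0xE0, 0xA0, 0x60, 0x61, 0xA1,
--     0x63, 0xA3, 0xA2, 0x62, 0x66, 0xA6, 0xA7, 0x67, 0xA5, 0x65, 0x64, 0xA4,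
--     0x6C, 0xAC, 0xAD, 0x6D, 0xAF, 0x6F, 0x6E, 0xAE, 0xAA, 0x6A, 0x6B, 0xAB,
--     0x69, 0xA9, 0xA8, 0x68, 0x78, 0xB8, 0xB9, 0x79, 0xBB, 0x7B, 0x7A, 0xBA,
--     0xBE, 0x7E, 0x7F, 0xBF, 0x7D, 0xBD, 0xBC, 0x7C, 0xB4, 0x74, 0x75, 0xB5,
--     0x77, 0xB7, 0xB6, 0x76, 0x72, 0xB2, 0xB3, 0x73, 0xB1, 0x71, 0x70, 0xB0,
--     0x50, 0x90, 0x91, 0x51, 0x93, 0x53, 0x52, 0x92, 0x96, 0x56, 0x57, 0x97,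
--     0x55, 0x95, 0x94, 0x54, 0x9C, 0x5C, 0x5D, 0x9D, 0x5F, 0x9F, 0x9E, 0x5E,
--     0x5A, 0x9A, 0x9B, 0x5B, 0x99, 0x59, 0x58, 0x98, 0x88, 0x48, 0x49, 0x89,
--     0x4B, 0x8B, 0x8A, 0x4A, 0x4E, 0x8E, 0x8F, 0x4F, 0x8D, 0x4D, 0x4C, 0x8C,
--     0x44, 0x84, 0x85, 0x45, 0x87, 0x47, 0x46, 0x86, 0x82, 0x42, 0x43, 0x83,
--     0x41, 0x81, 0x80, 0x40
-- ]
--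
-- def usMBCRC16(pucFrame, usLen):
--     ucCRCHi = 0xFF
--     ucCRCLo = 0xFF
--     iIndex = 0
--
--     for i in range(usLen):
--         iIndex = ucCRCLo ^ pucFrame[i]
--         ucCRCLo = ucCRCHi ^ aucCRCHi[iIndex]
--         ucCRCHi = aucCRCLo[iIndex]
--
--     return (ucCRCHi << 8) | ucCRCLo
-- ===== SOURCE B (Python) =====
-- def usMBCRC16(pucFrame, usLen):
--     crc = 0xFFFF
--     for i in range(usLen):
--         crc ^= pucFrame[i]
--         for _ in range(8):
--             if crc & 1:
--                 crc = (crc >> 1) ^ 0xA001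
--             else:
--                 crc >>= 1
--     return crc
-- ===== Notes on version B (the rewrite author's own statement) =====
-- stated objective: simpler
-- what changed: Replaced the two 256-entry lookup tables and the hi/lo byte-pair state by the direct bit-by-bit Modbus CRC16 (crc = 0xFFFF, xor in each byte, eight shift/0xA001 rounds), dropping both tables.
-- outside the precondition, e.g. on usMBCRC16([-1], 1): A returns 255, B returns -256; on usMBCRC16([300], 1): A raises IndexError, B returns 40383
import Mathlib
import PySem

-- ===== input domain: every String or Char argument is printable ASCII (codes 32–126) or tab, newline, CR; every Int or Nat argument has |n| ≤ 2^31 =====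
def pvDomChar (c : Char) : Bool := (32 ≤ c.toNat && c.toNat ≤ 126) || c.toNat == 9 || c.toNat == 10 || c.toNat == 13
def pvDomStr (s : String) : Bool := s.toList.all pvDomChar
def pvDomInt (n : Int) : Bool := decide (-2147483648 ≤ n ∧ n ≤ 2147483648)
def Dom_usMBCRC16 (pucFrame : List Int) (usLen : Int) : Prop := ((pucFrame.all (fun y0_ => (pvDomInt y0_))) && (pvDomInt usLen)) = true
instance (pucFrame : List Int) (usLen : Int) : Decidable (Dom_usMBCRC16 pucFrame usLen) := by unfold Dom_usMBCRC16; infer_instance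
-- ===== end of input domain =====

-- B replaces A's two 256-entry CRC lookup tables by the direct bit-by-bit Modbus CRC16
-- (xor each byte into crc, then eight shift/0xA001 rounds): simpler, same O(n) cost.

-- ===== PORT A =====
def aucCRCHiL : List Int := [0, 193, 129, 64, 1, 192, 128, 65, 1, 192, 128, 65, 0, 193, 129, 64, 1, 192, 128, 65, 0, 193, 129, 64, 0, 193, 129, 64, 1, 192, 128, 65, 1, 192, 128, 65, 0, 193, 129, 64, 0, 193, 129, 64, 1, 192, 128, 65, 0, 193, 129, 64, 1, 192, 128, 65, 1, 192, 128, 65, 0, 193, 129, 64, 1, 192, 128, 65, 0, 193, 129, 64, 0, 193, 129, 64, 1, 192, 128, 65, 0, 193, 129, 64, 1, 192, 128, 65, 1, 192, 128, 65, 0, 193, 129, 64, 0, 193, 129, 64, 1, 192, 128, 65, 1, 192, 128, 65, 0, 193, 129, 64, 1, 192, 128, 65, 0, 193, 129, 64, 0, 193, 129, 64, 1, 192, 128, 65, 1, 192, 128, 65, 0, 193, 129, 64, 0, 193, 129, 64, 1, 192, 128, 65, 0, 193, 129, 64, 1, 192, 128, 65, 1, 192, 128, 65, 0, 193, 129, 64,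 0, 193, 129, 64, 1, 192, 128, 65, 1, 192, 128, 65, 0, 193, 129, 64, 1, 192, 128, 65, 0, 193, 129, 64, 0, 193, 129, 64, 1, 192, 128, 65, 0, 193, 129, 64, 1, 192, 128, 65, 1, 192, 128, 65, 0, 193, 129, 64, 1, 192, 128, 65, 0, 193, 129, 64, 0, 193, 129, 64, 1, 192, 128, 65, 1, 192, 128, 65, 0, 193, 129, 64, 0, 193, 129, 64, 1, 192, 128, 65, 0, 193, 129, 64, 1, 192, 128, 65, 1, 192, 128, 65, 0, 193, 129, 64]

def aucCRCLoL : List Int := [0, 192, 193, 1, 195, 3, 2, 194, 198, 6, 7, 199, 5, 197, 196, 4, 204, 12, 13, 205, 15, 207, 206, 14, 10, 202, 203, 11, 201, 9, 8, 200, 216, 24, 25, 217, 27, 219, 218, 26, 30, 222, 223, 31, 221, 29, 28, 220, 20, 212, 213, 21, 215, 23, 22, 214, 210, 18, 19, 211, 17, 209, 208, 16, 240, 48, 49, 241, 51, 243, 242, 50, 54, 246, 247, 55, 245, 53, 52, 244, 60, 252, 253, 61, 255, 63, 62, 254, 250, 58, 59, 251, 57, 249, 248, 56, 40, 232, 233,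 41, 235, 43, 42, 234, 238, 46, 47, 239, 45, 237, 236, 44, 228, 36, 37, 229, 39, 231, 230, 38, 34, 226, 227, 35, 225, 33, 32, 224, 160, 96, 97, 161, 99, 163, 162, 98, 102, 166, 167, 103, 165, 101, 100, 164, 108, 172, 173, 109, 175, 111, 110, 174, 170, 106, 107, 171, 105, 169, 168, 104, 120, 184, 185, 121, 187, 123, 122, 186, 190, 126, 127, 191, 125, 189, 188, 124, 180, 116, 117, 181, 119, 183, 182, 118, 114, 178, 179, 115, 177, 113, 112, 176, 80, 144, 145, 81, 147, 83, 82, 146, 150, 86, 87, 151, 85, 149, 148, 84, 156, 92, 93, 157, 95, 159, 158, 94, 90, 154, 155, 91, 153, 89, 88, 152, 136, 72, 73, 137, 75, 139, 138, 74, 78, 142, 143, 79, 141, 77, 76, 140, 68, 132, 133, 69, 135, 71, 70, 134, 130, 66, 67, 131, 65, 129, 128, 64]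

def usMBCRC16 (pucFrame : List Int) (usLen : Int) : Int :=
  let s := (PySem.List.pyRange 0 usLen 1).foldl
    (fun (st : Int × Int) i =>
      let iIndex := PySem.Int.bxor st.2 (PySem.List.pyGetD pucFrame i 0)
      (PySem.List.pyGetD aucCRCLoL iIndex 0,
       PySem.Int.bxor st.1 (PySem.List.pyGetD aucCRCHiL iIndex 0)))
    (255, 255)
  PySem.Int.bor (s.1 <<< 8) s.2

-- ===== PORT B =====
def crcRound (crc : Int) : Int :=
  if PySem.Int.band crc 1 ≠ 0 then PySem.Int.bxor (crc >>> (1 : Nat)) 40961 else crc >>> (1 : Nat)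

def usMBCRC16_alt (pucFrame : List Int) (usLen : Int) : Int :=
  (PySem.List.pyRange 0 usLen 1).foldl
    (fun crc i =>
      (List.range 8).foldl (fun c _ => crcRound c)
        (PySem.Int.bxor crc (PySem.List.pyGetD pucFrame i 0)))
    65535

-- ===== PRECONDITION & SPEC =====
-- Pre_ excludes frames whose consumed prefix contains a non-byte (outside 0..255), and usLen beyond
-- the frame length: there Python A raises IndexError, except for small negative elements where A's
-- value comes from Python's accidental negative-index wraparound into the tables, a corner neither
-- implementation's value specifies (B returns its own shift-arithmetic value there).
def Pre_usMBCRC16 (pucFrame : List Int) (usLen : Int) : Prop :=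
  usLen ≤ (pucFrame.length : Int) ∧ ∀ b ∈ pucFrame.take usLen.toNat, 0 ≤ b ∧ b < 256
instance (pucFrame : List Int) (usLen : Int) : Decidable (Pre_usMBCRC16 pucFrame usLen) := by
  unfold Pre_usMBCRC16; infer_instance

def pvWitness_usMBCRC16 : List Int × Int := ([1, 2, 255], 3)

def Spec_usMBCRC16 (pucFrame : List Int) (usLen : Int) (out : Int) : Prop := out = usMBCRC16_alt pucFrame usLen
instance (pucFrame : List Int) (usLen : Int) (out : Int) : Decidable (Spec_usMBCRC16 pucFrame usLen out) := by unfold Spec_usMBCRC16; infer_instance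

-- ===== CLAIM (what is proved, stated in full; the proofs are below) =====
def Claim_equal_usMBCRC16 : Prop := ∀ (pucFrame : List Int) (usLen : Int), Dom_usMBCRC16 pucFrame usLen → Pre_usMBCRC16 pucFrame usLen → Spec_usMBCRC16 pucFrame usLen (usMBCRC16 pucFrame usLen)

-- ===== LEMMAS AND PROOFS =====

-- Nat model of one CRC shift round and of eight of them.
def nRound (x : Nat) : Nat := if x &&& 1 = 1 then (x >>> 1) ^^^ 40961 else x >>> 1
def nf8 (x : Nat) : Nat := nRound (nRound (nRound (nRound (nRound (nRound (nRound (nRound x)))))))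

def tHi (j : Nat) : Nat := (aucCRCHiL.getD j 0).toNat
def tLo (j : Nat) : Nat := (aucCRCLoL.getD j 0).toNat

lemma sr1_xor (a b : Nat) : (a ^^^ b) >>> 1 = (a >>> 1) ^^^ (b >>> 1) := by
  apply Nat.eq_of_testBit_eq
  intro i
  simp [Nat.testBit_shiftRight, Nat.testBit_xor]

lemma and1_xor (a b : Nat) : (a ^^^ b) &&& 1 = (a &&& 1) ^^^ (b &&& 1) := by
  apply Nat.eq_of_testBit_eq
  intro i
  simp only [Nat.testBit_and, Nat.testBit_xor]
  cases a.testBit i <;> cases b.testBit i <;> cases (1 : Nat).testBit i <;> rfl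

lemma and1_cases (a : Nat) : a &&& 1 = 0 ∨ a &&& 1 = 1 := by
  rw [Nat.and_one_is_mod]; omega

lemma nRound_xor (a b : Nat) : nRound (a ^^^ b) = nRound a ^^^ nRound b := by
  unfold nRound
  rw [and1_xor, sr1_xor]
  rcases and1_cases a with ha | ha <;> rcases and1_cases b with hb | hb <;>
    simp [ha, hb, Nat.xor_assoc, Nat.xor_comm, Nat.xor_left_comm, Nat.xor_self,
      Nat.zero_xor]

lemma nRound_two_mul (x : Nat) : nRound (2 * x) = x := by
  unfold nRound
  rw [Nat.and_one_is_mod, Nat.mul_mod_right, Nat.shiftRight_one]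
  simp [Nat.mul_div_cancel_left x (by norm_num : (0:Nat) < 2)]

lemma nf8_mul256 (x : Nat) : nf8 (256 * x) = x := by
  have h : (256 : Nat) * x = 2 * (2 * (2 * (2 * (2 * (2 * (2 * (2 * x))))))) := by ring
  rw [nf8, h]
  simp only [nRound_two_mul]

lemma nf8_xor (a b : Nat) : nf8 (a ^^^ b) = nf8 a ^^^ nf8 b := by
  simp [nf8, nRound_xor]

lemma xor_lt256 {a b : Nat} (ha : a < 256) (hb : b < 256) : a ^^^ b < 256 := by
  have h := Nat.xor_lt_two_pow (n := 8) (by omega : a < 2 ^ 8) (by omega : b < 2 ^ 8)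
  omega

set_option maxRecDepth 100000 in
set_option maxHeartbeats 2000000 in
lemma tableLemma : ∀ j ∈ List.range 256,
    nf8 j = (256 * tLo j) ^^^ tHi j ∧ tHi j < 256 ∧ tLo j < 256 ∧
      0 ≤ aucCRCHiL.getD j 0 ∧ 0 ≤ aucCRCLoL.getD j 0 := by decide

lemma tbl (j : Nat) (hj : j < 256) :
    nf8 j = (256 * tLo j) ^^^ tHi j ∧ tHi j < 256 ∧ tLo j < 256 ∧
      0 ≤ aucCRCHiL.getD j 0 ∧ 0 ≤ aucCRCLoL.getD j 0 :=
  tableLemma j (List.mem_range.mpr hj)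

lemma or_eq_xor (h l : Nat) (hl : l < 256) : (h <<< 8) ||| l = (h <<< 8) ^^^ l := by
  apply Nat.eq_of_testBit_eq
  intro i
  by_cases h8 : 8 ≤ i
  · have hf : l.testBit i = false :=
      Nat.testBit_lt_two_pow (lt_of_lt_of_le hl (by
        calc (256 : Nat) = 2 ^ 8 := by norm_num
        _ ≤ 2 ^ i := Nat.pow_le_pow_right (by norm_num) h8))
    simp [Nat.testBit_or, Nat.testBit_xor, hf]
  · have hf : (h <<< 8).testBit i = false := by
      simp [Nat.testBit_shiftLeft, h8]
    simp [Nat.testBit_or, Nat.testBit_xor, hf]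

lemma shiftLeft8 (h : Nat) : h <<< 8 = 256 * h := by
  rw [Nat.shiftLeft_eq]; ring

set_option maxRecDepth 10000 in
lemma crcRound_natCast (n : Nat) : crcRound (n : Int) = ((nRound n : Nat) : Int) := by
  unfold crcRound nRound
  have hsr : ((n : Int) >>> (1 : Nat)) = ((n >>> 1 : Nat) : Int) := by exact_mod_cast rfl
  have hband : PySem.Int.band (n : Int) 1 = ((n &&& 1 : Nat) : Int) := by
    rw [show (1 : Int) = ((1 : Nat) : Int) from rfl, PySem.Int.band_natCast]
  rcases and1_cases n with h | h
  · rw [hband, h]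
    rw [if_neg (show ¬(((0 : Nat) : Int) ≠ 0) by simp)]
    rw [if_neg (show ¬((0 : Nat) = 1) by decide)]
    exact hsr
  · rw [hband, h]
    rw [if_pos (show (((1 : Nat) : Int)) ≠ 0 by simp)]
    rw [if_pos (show (1 : Nat) = 1 from rfl)]
    rw [hsr, show (40961 : Int) = ((40961 : Nat) : Int) from rfl, PySem.Int.bxor_natCast]

lemma fold8_natCast (n : Nat) :
    (List.range 8).foldl (fun c _ => crcRound c) (n : Int) = ((nf8 n : Nat) : Int) := by
  have e : List.range 8 = [0, 1, 2, 3, 4, 5, 6, 7] := rfl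
  rw [e]
  simp only [List.foldl_cons, List.foldl_nil, crcRound_natCast]
  rfl

lemma stepB_core (hn ln bn : Nat) (hln : ln < 256) (hbn : bn < 256) :
    (List.range 8).foldl (fun c _ => crcRound c)
        (PySem.Int.bxor ((((256 * hn) ^^^ ln : Nat)) : Int) (bn : Int)) =
      (((256 * tLo (ln ^^^ bn)) ^^^ (hn ^^^ tHi (ln ^^^ bn)) : Nat) : Int) := by
  rw [PySem.Int.bxor_natCast, fold8_natCast]
  congr 1
  rw [Nat.xor_assoc, nf8_xor, nf8_mul256, (tbl (ln ^^^ bn) (xor_lt256 hln hbn)).1]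
  rw [← Nat.xor_assoc, Nat.xor_comm hn (256 * tLo (ln ^^^ bn)), Nat.xor_assoc]

lemma loopEq (pucFrame : List Int) :
    ∀ (l : List Int) (hn ln : Nat), hn < 256 → ln < 256 →
    (∀ i ∈ l, ∃ bn : Nat, PySem.List.pyGetD pucFrame i 0 = (bn : Int) ∧ bn < 256) →
    ∃ (hn' ln' : Nat), hn' < 256 ∧ ln' < 256 ∧
      l.foldl
        (fun (st : Int × Int) i =>
          let iIndex := PySem.Int.bxor st.2 (PySem.List.pyGetD pucFrame i 0)
          (PySem.List.pyGetD aucCRCLoL iIndex 0,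
           PySem.Int.bxor st.1 (PySem.List.pyGetD aucCRCHiL iIndex 0)))
        ((hn : Int), (ln : Int)) = ((hn' : Int), (ln' : Int)) ∧
      l.foldl
        (fun crc i =>
          (List.range 8).foldl (fun c _ => crcRound c)
            (PySem.Int.bxor crc (PySem.List.pyGetD pucFrame i 0)))
        ((((256 * hn) ^^^ ln : Nat)) : Int) = ((((256 * hn') ^^^ ln' : Nat)) : Int) := by
  intro l
  induction l with
  | nil =>
    intro hn ln hhn hln _
    exact ⟨hn, ln, hhn, hln, rfl, rfl⟩
  | cons i l ih =>
    intro hn ln hhn hln hbytes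
    obtain ⟨bn, hb, hbn⟩ := hbytes i (List.mem_cons_self ..)
    have hj : ln ^^^ bn < 256 := xor_lt256 hln hbn
    obtain ⟨hf8, hHlt, hLlt, hHnn, hLnn⟩ := tbl (ln ^^^ bn) hj
    have hstepA :
        (PySem.List.pyGetD aucCRCLoL (PySem.Int.bxor ((ln : Nat) : Int) (PySem.List.pyGetD pucFrame i 0)) 0,
         PySem.Int.bxor ((hn : Nat) : Int) (PySem.List.pyGetD aucCRCHiL (PySem.Int.bxor ((ln : Nat) : Int) (PySem.List.pyGetD pucFrame i 0)) 0)) =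
        (((tLo (ln ^^^ bn) : Nat) : Int), ((hn ^^^ tHi (ln ^^^ bn) : Nat) : Int)) := by
      rw [hb, PySem.Int.bxor_natCast, PySem.List.pyGetD_natCast, PySem.List.pyGetD_natCast]
      rw [show aucCRCLoL.getD (ln ^^^ bn) 0 = ((tLo (ln ^^^ bn) : Nat) : Int) from
            (Int.toNat_of_nonneg hLnn).symm,
          show aucCRCHiL.getD (ln ^^^ bn) 0 = ((tHi (ln ^^^ bn) : Nat) : Int) from
            (Int.toNat_of_nonneg hHnn).symm,
          PySem.Int.bxor_natCast]
    have hstepB :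
        (List.range 8).foldl (fun c _ => crcRound c)
            (PySem.Int.bxor ((((256 * hn) ^^^ ln : Nat)) : Int) (PySem.List.pyGetD pucFrame i 0)) =
          (((256 * tLo (ln ^^^ bn)) ^^^ (hn ^^^ tHi (ln ^^^ bn)) : Nat) : Int) := by
      rw [hb]; exact stepB_core hn ln bn hln hbn
    obtain ⟨hn', ln', h1, h2, hA, hB⟩ :=
      ih (tLo (ln ^^^ bn)) (hn ^^^ tHi (ln ^^^ bn)) hLlt (xor_lt256 hhn hHlt)
        (fun i hi => hbytes i (List.mem_cons_of_mem _ hi))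
    refine ⟨hn', ln', h1, h2, ?_, ?_⟩
    · rw [List.foldl_cons]
      show List.foldl _ (PySem.List.pyGetD aucCRCLoL (PySem.Int.bxor ((ln : Nat) : Int) (PySem.List.pyGetD pucFrame i 0)) 0,
         PySem.Int.bxor ((hn : Nat) : Int) (PySem.List.pyGetD aucCRCHiL (PySem.Int.bxor ((ln : Nat) : Int) (PySem.List.pyGetD pucFrame i 0)) 0)) _ = _
      rw [hstepA]
      exact hA
    · rw [List.foldl_cons, hstepB]
      exact hB

lemma final_or (h l : Nat) (hl : l < 256) :
    PySem.Int.bor ((h : Int) <<< 8) (l : Int) = ((((256 * h) ^^^ l : Nat)) : Int) := by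
  have hsl : ((h : Int) <<< 8) = ((h <<< 8 : Nat) : Int) := by exact_mod_cast rfl
  rw [hsl, PySem.Int.bor_natCast, or_eq_xor h l hl, shiftLeft8]

-- ===== VERDICT (by name: the statement is the Claim_ definition above) =====
theorem usMBCRC16_spec : Claim_equal_usMBCRC16 := by
  unfold Claim_equal_usMBCRC16 Spec_usMBCRC16
  intro pucFrame usLen _ hpre
  obtain ⟨hlen, hbytes⟩ := hpre
  have hb : ∀ i ∈ PySem.List.pyRange 0 usLen 1,
      ∃ bn : Nat, PySem.List.pyGetD pucFrame i 0 = (bn : Int) ∧ bn < 256 := by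
    intro i hi
    rw [PySem.List.mem_pyRange_one] at hi
    obtain ⟨h0, h1⟩ := hi
    have hilen : i < (pucFrame.length : Int) := lt_of_lt_of_le h1 hlen
    have hit : i.toNat < pucFrame.length := by omega
    have hmem : pucFrame[i.toNat] ∈ pucFrame.take usLen.toNat := by
      have hlt : i.toNat < usLen.toNat := by omega
      have hgt : (pucFrame.take usLen.toNat)[i.toNat]'(by simp; omega) = pucFrame[i.toNat] :=
        List.getElem_take
      rw [← hgt]
      exact List.getElem_mem _
    obtain ⟨hb0, hb1⟩ := hbytes _ hmem
    refine ⟨pucFrame[i.toNat].toNat, ?_, by omega⟩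
    rw [PySem.List.pyGetD_eq_getElem pucFrame 0 h0 hilen, Int.toNat_of_nonneg hb0]
  obtain ⟨hn', ln', h1, h2, hA, hB⟩ :=
    loopEq pucFrame (PySem.List.pyRange 0 usLen 1) 255 255 (by omega) (by omega) hb
  show usMBCRC16 pucFrame usLen = usMBCRC16_alt pucFrame usLen
  unfold usMBCRC16 usMBCRC16_alt
  have e0 : ((((256 * 255) ^^^ 255 : Nat)) : Int) = 65535 := by decide
  have e255 : ((255 : Int), (255 : Int)) = (((255 : Nat) : Int), ((255 : Nat) : Int)) := by decide
  rw [e255]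
  rw [← e0]
  rw [hB, hA]
  exact final_or hn' ln' h2
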